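-- pv_equiv track=rewrite | github.com/totogs/3I005 | projet1.py | compte_mot_email
-- ===== SOURCE A (Python) =====
-- def compte_mot_email(liste_mots, mails):
--
-- 	freq = []
--
-- 	for mot in liste_mots:
-- 		cpt=0
-- 		for mail in mails:
--
-- 			if(mail.find(mot)!=-1):
-- 				cpt+=1
--
-- 		if(cpt > 3):
-- 			freq.append(mot)
--
-- 	return freq
-- ===== SOURCE B (Python) =====
-- def compte_mot_email(liste_mots, mails):
--     # Set-of-patterns dictionary matching: scan each mail once, enumerating its
--     # substrings of the pattern lengths and looking them up in a hash set of the
--     # words; no per-word find() over the mails.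
--     words = set(liste_mots)
--     lengths = {len(w) for w in words}
--     founds = []
--     for mail in mails:
--         n = len(mail)
--         found = set()
--         for L in lengths:
--             for i in range(n - L + 1):
--                 s = mail[i:i+L]
--                 if s in words:
--                     found.add(s)
--         founds.append(found)
--     return [mot for mot in liste_mots if sum(mot in f for f in founds) > 3]
-- ===== Notes on version B (the rewrite author's own statement) =====
-- stated objective: faster
-- what changed: B never calls find per word: it does set-of-patterns dictionary matching — each mail is scanned once, its substrings of the distinct pattern lengths are looked up in a hash set of the words, per-mail found-sets are collected, and the word list is filtered by how many found-sets contain each word.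
import Mathlib
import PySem

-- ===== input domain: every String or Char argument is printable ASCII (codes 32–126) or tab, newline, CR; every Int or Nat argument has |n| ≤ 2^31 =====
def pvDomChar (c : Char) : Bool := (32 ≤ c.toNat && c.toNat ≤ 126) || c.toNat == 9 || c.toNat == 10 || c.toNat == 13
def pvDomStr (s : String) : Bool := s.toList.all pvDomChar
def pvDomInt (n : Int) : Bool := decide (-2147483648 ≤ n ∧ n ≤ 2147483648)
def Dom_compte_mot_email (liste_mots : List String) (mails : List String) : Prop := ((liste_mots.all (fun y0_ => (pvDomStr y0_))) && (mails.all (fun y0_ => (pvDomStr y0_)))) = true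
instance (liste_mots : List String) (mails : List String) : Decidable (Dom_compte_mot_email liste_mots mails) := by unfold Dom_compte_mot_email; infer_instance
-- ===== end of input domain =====

-- B replaces A's per-word find() over the mails by set-of-patterns dictionary matching:
-- each mail is scanned once, its substrings of the distinct pattern lengths are looked up
-- in a hash set of the words, and the word list is filtered by the per-mail found-sets.


-- ===== PORT A =====
def compte_mot_email (liste_mots : List String) (mails : List String) : List String :=
  liste_mots.foldl (fun freq mot =>
    if (mails.foldl (fun cpt mail =>
          if PySem.Str.find mail mot ≠ -1 then cpt + 1 else cpt) (0 : Int)) > 3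
    then freq ++ [mot] else freq) []

-- ===== PORT B =====
-- inner loop 'for i in range(n - L + 1): s = mail[i:i+L]; if s in words: found.add(s)'
def pvScanLen (words : PySem.Set String) (mail : String) (found : PySem.Set String) (L : Int) : PySem.Set String :=
  (PySem.List.pyRange 0 (PySem.Str.len mail - L + 1)).foldl
    (fun found i =>
      let s := PySem.Str.slice mail (some i) (some (i + L))
      if PySem.Set.contains words s then PySem.Set.add found s else found) found

-- words = set(liste_mots); lengths = {len(w) for w in words}; founds collects the
-- per-mail found-sets; the final filter keeps words present in > 3 found-sets.
def pvLengths (words : PySem.Set String) : PySem.Set Int :=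
  PySem.Set.ofList (words.map PySem.Str.len)

def compte_mot_email_alt (liste_mots : List String) (mails : List String) : List String :=
  liste_mots.filter (fun mot =>
    decide (((mails.foldl (fun fs mail =>
        fs ++ [(pvLengths (PySem.Set.ofList liste_mots)).foldl
                 (pvScanLen (PySem.Set.ofList liste_mots) mail) PySem.Set.empty]) []).map
        (fun f => if mot ∈ f then (1 : Int) else 0)).sum > 3))

-- ===== PRECONDITION & SPEC =====
def Spec_compte_mot_email (liste_mots : List String) (mails : List String) (out : List String) : Prop := out = compte_mot_email_alt liste_mots mails
instance (liste_mots : List String) (mails : List String) (out : List String) : Decidable (Spec_compte_mot_email liste_mots mails out) := by unfold Spec_compte_mot_email; infer_instance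

-- ===== CLAIM =====
def Claim_equal_compte_mot_email : Prop := ∀ (liste_mots : List String) (mails : List String), Dom_compte_mot_email liste_mots mails → Spec_compte_mot_email liste_mots mails (compte_mot_email liste_mots mails)

-- ===== LEMMAS AND PROOFS =====

-- Membership in the inner scan over positions: y is in the result iff it was there
-- already or some slice of mail equals y and is one of the words.
theorem mem_scan_inner (words : PySem.Set String) (mail : String) (L : Int)
    (is : List Int) (acc : PySem.Set String) (y : String) :
    y ∈ is.foldl (fun found i =>
        let s := PySem.Str.slice mail (some i) (some (i + L))
        if PySem.Set.contains words s then PySem.Set.add found s else found) acc ↔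
      y ∈ acc ∨ ∃ i ∈ is, PySem.Set.contains words (PySem.Str.slice mail (some i) (some (i + L))) = true ∧
        PySem.Str.slice mail (some i) (some (i + L)) = y := by
  induction is generalizing acc with
  | nil => simp
  | cons i t ih =>
    simp only [List.foldl_cons]
    by_cases hc : PySem.Set.contains words (PySem.Str.slice mail (some i) (some (i + L))) = true
    · rw [if_pos hc, ih, PySem.Set.mem_add]
      constructor
      · rintro (⟨h | h⟩ | ⟨j, hj, hcj, hej⟩)
        · exact Or.inl h
        · exact Or.inr ⟨i, by simp, hc, h.symm⟩
        · exact Or.inr ⟨j, by simp [hj], hcj, hej⟩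
      · rintro (h | ⟨j, hj, hcj, hej⟩)
        · exact Or.inl (Or.inl h)
        · rcases List.mem_cons.mp hj with rfl | hj
          · exact Or.inl (Or.inr hej.symm)
          · exact Or.inr ⟨j, hj, hcj, hej⟩
    · rw [if_neg hc, ih]
      constructor
      · rintro (h | ⟨j, hj, hcj, hej⟩)
        · exact Or.inl h
        · exact Or.inr ⟨j, by simp [hj], hcj, hej⟩
      · rintro (h | ⟨j, hj, hcj, hej⟩)
        · exact Or.inl h
        · rcases List.mem_cons.mp hj with rfl | hj
          · exact absurd hcj hc
          · exact Or.inr ⟨j, hj, hcj, hej⟩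

-- Membership in the outer scan over the pattern lengths.
theorem mem_scan (words : PySem.Set String) (mail : String)
    (ls : List Int) (acc : PySem.Set String) (y : String) :
    y ∈ ls.foldl (pvScanLen words mail) acc ↔
      y ∈ acc ∨ ∃ L ∈ ls, ∃ i ∈ PySem.List.pyRange 0 (PySem.Str.len mail - L + 1),
        PySem.Set.contains words (PySem.Str.slice mail (some i) (some (i + L))) = true ∧
        PySem.Str.slice mail (some i) (some (i + L)) = y := by
  induction ls generalizing acc with
  | nil => simp
  | cons L t ih =>
    simp only [List.foldl_cons]
    rw [ih]
    unfold pvScanLen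
    rw [mem_scan_inner]
    constructor
    · rintro (⟨h | ⟨i, hi, hc, he⟩⟩ | ⟨M, hM, rest⟩)
      · exact Or.inl h
      · exact Or.inr ⟨L, by simp, i, hi, hc, he⟩
      · exact Or.inr ⟨M, by simp [hM], rest⟩
    · rintro (h | ⟨M, hM, rest⟩)
      · exact Or.inl (Or.inl h)
      · rcases List.mem_cons.mp hM with rfl | hM
        · exact Or.inl (Or.inr rest)
        · exact Or.inr ⟨M, hM, rest⟩

-- A prefix of a dropped tail is an infix.
theorem infix_of_prefix_drop {l1 l2 : List Char} {i : Nat} (h : l1 <+: l2.drop i) :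
    l1 <:+: l2 :=
  h.isInfix.trans (l2.drop_suffix i).isInfix

-- For a word of the list, membership in a mail's found-set is exactly substring occurrence.
theorem mem_found_iff (liste_mots : List String) (mot mail : String)
    (hmot : mot ∈ liste_mots) :
    mot ∈ (pvLengths (PySem.Set.ofList liste_mots)).foldl
        (pvScanLen (PySem.Set.ofList liste_mots) mail) PySem.Set.empty ↔
      mot.toList <:+: mail.toList := by
  rw [mem_scan]
  constructor
  · rintro (h | ⟨L, hL, i, hi, _, he⟩)
    · simp [PySem.Set.empty] at h
    · obtain ⟨hi0, _⟩ := PySem.List.mem_pyRange_one.mp hi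
      have hL0 : (0:Int) ≤ L := by
        rcases List.mem_map.mp ((PySem.Set.mem_ofList _ _).mp hL) with ⟨w, _, rfl⟩
        rw [PySem.Str.len_eq]
        exact Int.natCast_nonneg _
      obtain ⟨a, rfl⟩ := Int.eq_ofNat_of_zero_le hi0
      obtain ⟨l, rfl⟩ := Int.eq_ofNat_of_zero_le hL0
      have hs : (PySem.Str.slice mail (some (a:Int)) (some ((a:Int) + (l:Int)))).toList
          = (mail.toList.drop a).take l := by
        rw [PySem.Str.toList_slice, PySem.Chars.slice_eq_listSlice]
        have hcast : ((a:Int) + (l:Int)) = ((a + l : Nat) : Int) := by push_cast; ring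
        rw [hcast, PySem.List.slice_natCast]
        congr 1
        omega
      have hmt : mot.toList = (mail.toList.drop a).take l := by rw [← he, hs]
      exact infix_of_prefix_drop (hmt ▸ (mail.toList.drop a).take_prefix l)
  · intro hinf
    obtain ⟨pre, suf, hsplit⟩ := hinf
    have hmw : mot ∈ PySem.Set.ofList liste_mots := (PySem.Set.mem_ofList _ _).mpr hmot
    have hslice : PySem.Str.slice mail (some (pre.length : Int))
        (some ((pre.length : Int) + (mot.toList.length : Int))) = mot := by
      apply String.toList_inj.mp
      rw [PySem.Str.toList_slice, PySem.Chars.slice_eq_listSlice]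
      have hcast : ((pre.length:Int) + (mot.toList.length:Int))
          = ((pre.length + mot.toList.length : Nat) : Int) := by push_cast; ring
      rw [hcast, PySem.List.slice_natCast, ← hsplit]
      rw [List.append_assoc, List.drop_left]
      have : pre.length + mot.toList.length - pre.length = mot.toList.length := by omega
      rw [this, List.take_left]
    refine Or.inr ⟨(mot.toList.length : Int), ?_, (pre.length : Int), ?_, ?_, ?_⟩
    · refine (PySem.Set.mem_ofList _ _).mpr (List.mem_map.mpr ⟨mot, hmw, ?_⟩)
      rw [PySem.Str.len_eq]
    · refine PySem.List.mem_pyRange_one.mpr ⟨Int.natCast_nonneg _, ?_⟩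
      rw [PySem.Str.len_eq]
      have hlen : mail.toList.length = pre.length + mot.toList.length + suf.length := by
        rw [← hsplit]; simp; omega
      omega
    · rw [hslice]
      exact (PySem.Set.contains_iff _ _).mpr hmw
    · exact hslice

-- ===== VERDICT =====
theorem compte_mot_email_spec : Claim_equal_compte_mot_email := by
  intro liste_mots mails _
  unfold Spec_compte_mot_email compte_mot_email compte_mot_email_alt
  rw [PySem.List.foldl_append_ite_eq_filter
      (p := fun mot => (mails.foldl (fun cpt mail =>
        if PySem.Str.find mail mot ≠ -1 then cpt + 1 else cpt) (0 : Int)) > 3)]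
  rw [List.nil_append]
  refine List.filter_congr (fun mot hmot => ?_)
  rw [decide_eq_decide]
  rw [PySem.List.foldl_ite_add_one (p := fun mail => PySem.Str.find mail mot ≠ -1),
      Int.zero_add]
  rw [PySem.List.foldl_append_singleton_eq_map
      (f := fun mail => (pvLengths (PySem.Set.ofList liste_mots)).foldl
        (pvScanLen (PySem.Set.ofList liste_mots) mail) PySem.Set.empty),
      List.nil_append, List.map_map]
  have hfun : ((fun f => if mot ∈ f then (1:Int) else 0) ∘
        (fun mail => (pvLengths (PySem.Set.ofList liste_mots)).foldl
          (pvScanLen (PySem.Set.ofList liste_mots) mail) PySem.Set.empty))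
      = (fun mail : String => if (fun m => decide (mot.toList <:+: m.toList)) mail = true
          then (1:Int) else 0) := by
    funext mail
    simp only [Function.comp]
    rw [if_congr (mem_found_iff liste_mots mot mail hmot) rfl rfl]
    simp
  rw [hfun, PySem.List.sum_map_ite_one_zero]
  have hcnt : mails.countP (fun x => decide (PySem.Str.find x mot ≠ -1))
      = mails.countP (fun m => decide (mot.toList <:+: m.toList)) := by
    refine List.countP_congr (fun x _ => ?_)
    simp [PySem.Chars.find_eq_neg_one_iff]
  rw [hcnt]
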